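-- pv_equiv track=rewrite | github.com/kyawsawshein/odoo_api | app/customer/controller.py | get_full_address
-- ===== SOURCE A (Python) =====
-- def get_full_address(data: dict) -> str:
--     return ", ".join(filter(None,[
--         f"Room {data['room_no']}" if data.get('room_no') not in (None, '') else None,
--         f"Floor {data['floor']}" if data.get('floor') not in (None, '') else None,
--         f"Unit {data['unit']}" if data.get('unit') not in (None, '') else None,
--         f"Building No{data['building_no']}" if data.get('building_no') not in (None, '') else None,
--         *[
--             str(data[key]) for key in [
--                 'housing_name', 'street_name', 'block', 'ward_name',
--                 'township_name', 'city_name', 'state_name',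
--                 'country_name', 'billing_township_name'
--             ] if data.get(key) not in (None, '')
--         ]
--     ]))
-- ===== SOURCE B (Python) =====
-- SPECS = [
--     ('room_no', 'Room '), ('floor', 'Floor '), ('unit', 'Unit '),
--     ('building_no', 'Building No'),
--     ('housing_name', ''), ('street_name', ''), ('block', ''),
--     ('ward_name', ''), ('township_name', ''), ('city_name', ''),
--     ('state_name', ''), ('country_name', ''), ('billing_township_name', ''),
-- ]
--
-- POS = {key: (i, prefix) for i, (key, prefix) in enumerate(SPECS)}
--
--
-- def get_full_address(data: dict) -> str:
--     # One pass over the dict items: each relevant non-blank value is dropped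
--     # into its fixed slot; the slots are then joined in field order.
--     slots = [None] * len(SPECS)
--     for k, v in data.items():
--         spec = POS.get(k)
--         if spec is not None and v not in (None, ''):
--             slots[spec[0]] = spec[1] + str(v)
--     return ', '.join(s for s in slots if s is not None)
-- ===== Notes on version B (the rewrite author's own statement) =====
-- stated objective: alternative
-- what changed: Instead of probing the dict thirteen times with data.get along a fixed field list (inline conditionals plus a comprehension, then filter(None)), B makes a single pass over data.items(), routing each relevant non-blank value through a key->(slot index, prefix) table into a fixed slot array, and joins the filled slots in field order; Pre_ excludes association lists with duplicate keys, which never arise from a Python dict and on which first-match vs last-match lookup order is accidental.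
import Mathlib
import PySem

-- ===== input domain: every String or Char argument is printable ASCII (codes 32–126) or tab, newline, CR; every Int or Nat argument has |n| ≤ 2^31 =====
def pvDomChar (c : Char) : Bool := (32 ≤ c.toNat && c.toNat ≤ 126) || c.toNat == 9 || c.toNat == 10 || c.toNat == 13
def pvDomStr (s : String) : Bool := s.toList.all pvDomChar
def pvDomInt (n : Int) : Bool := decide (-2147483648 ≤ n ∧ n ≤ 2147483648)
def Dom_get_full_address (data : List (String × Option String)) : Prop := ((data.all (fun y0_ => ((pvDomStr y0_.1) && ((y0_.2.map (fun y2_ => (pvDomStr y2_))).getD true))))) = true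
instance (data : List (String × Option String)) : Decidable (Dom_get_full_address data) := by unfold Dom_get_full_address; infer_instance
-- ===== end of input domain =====

-- B replaces A's thirteen data.get probes along a fixed field list with a single pass
-- over the dict items routed through a key -> (slot, prefix) table; objective: alternative.

-- shared test 'v not in (None, "")' (both Pythons contain it literally)
def pvNotBlank (v : Option String) : Bool := !(v == none || v == some "")

-- Python's filter(None, ...) step on an Optional[str] element (drops None and "")
def pvTruthy (o : Option String) : Option String :=
  match o with
  | some s => if s == "" then none else some s
  | none => none

-- ===== PORT A =====
def get_full_address (data : List (String × Option String)) : String :=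
  let d := PySem.Dict.mk data
  let g : String → Option String := fun k => (PySem.Dict.get? d k).getD none
  let items : List (Option String) :=
    [ if pvNotBlank (g "room_no") then some (PySem.Str.join "" ["Room ", (g "room_no").getD ""]) else none,
      if pvNotBlank (g "floor") then some (PySem.Str.join "" ["Floor ", (g "floor").getD ""]) else none,
      if pvNotBlank (g "unit") then some (PySem.Str.join "" ["Unit ", (g "unit").getD ""]) else none,
      if pvNotBlank (g "building_no") then some (PySem.Str.join "" ["Building No", (g "building_no").getD ""]) else none ]
    ++ (((["housing_name", "street_name", "block", "ward_name",
           "township_name", "city_name", "state_name",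
           "country_name", "billing_township_name"] : List String).filter
            (fun k => pvNotBlank (g k))).map (fun k => some ((g k).getD "")))
  PySem.Str.join ", " (items.filterMap pvTruthy)

-- ===== PORT B =====
def pvSpecs : List (String × String) :=
  [("room_no", "Room "), ("floor", "Floor "), ("unit", "Unit "),
   ("building_no", "Building No"),
   ("housing_name", ""), ("street_name", ""), ("block", ""),
   ("ward_name", ""), ("township_name", ""), ("city_name", ""),
   ("state_name", ""), ("country_name", ""), ("billing_township_name", "")]

-- POS = {key: (i, prefix) for i, (key, prefix) in enumerate(SPECS)}
def pvPos : PySem.Dict String (Nat × String) :=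
  PySem.Dict.mk (pvSpecs.zipIdx.map (fun p => (p.1.1, (p.2, p.1.2))))

-- the loop body: route one dict item into its slot
def pvUpd (slots : List (Option String)) (kv : String × Option String) : List (Option String) :=
  match PySem.Dict.get? pvPos kv.1 with
  | some ip =>
      if pvNotBlank kv.2
      then slots.set ip.1 (some (PySem.Str.join "" [ip.2, kv.2.getD ""]))
      else slots
  | none => slots

def get_full_address_alt (data : List (String × Option String)) : String :=
  let d := PySem.Dict.mk data
  let slots := d.items.foldl pvUpd (List.replicate pvSpecs.length (none : Option String))
  PySem.Str.join ", " (slots.filterMap id)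

-- ===== PRECONDITION & SPEC =====
-- Pre_ excludes association lists with duplicate keys: a Python dict never has them,
-- and on such lists A's first-match lookup vs B's item-by-item overwrite is accidental.
def Pre_get_full_address (data : List (String × Option String)) : Prop :=
  (data.map Prod.fst).Nodup
instance (data : List (String × Option String)) : Decidable (Pre_get_full_address data) := by
  unfold Pre_get_full_address; infer_instance

def pvWitness_get_full_address : (List (String × Option String)) :=
  [("room_no", some "12"), ("floor", none), ("city_name", some "Yangon")]

def Spec_get_full_address (data : List (String × Option String)) (out : String) : Prop := out = get_full_address_alt data
instance (data : List (String × Option String)) (out : String) : Decidable (Spec_get_full_address data out) := by unfold Spec_get_full_address; infer_instance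

-- ===== CLAIM (what is proved, stated in full; the proofs are below) =====
def Claim_equal_get_full_address : Prop := ∀ (data : List (String × Option String)), Dom_get_full_address data → Pre_get_full_address data → Spec_get_full_address data (get_full_address data)

-- ===== LEMMAS AND PROOFS =====

-- one selected field, as both sides produce it
def pvPiece (g : String → Option String) (kv : String × String) : Option String :=
  if pvNotBlank (g kv.1) then some (PySem.Str.join "" [kv.2, (g kv.1).getD ""]) else none

lemma pv_join_empty_left (s : String) : PySem.Str.join "" ["", s] = s := by
  apply String.toList_injective
  simp [PySem.Str.toList_join, PySem.Chars.join_cons_cons, PySem.Chars.join_singleton]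

lemma pv_join_ne_empty (pre s : String) (h : pre ≠ "") :
    PySem.Str.join "" [pre, s] ≠ "" := by
  intro he
  have h2 : (PySem.Str.join "" [pre, s]).toList = ([] : List Char) := by simp [he]
  rw [PySem.Str.toList_join] at h2
  simp [PySem.Chars.join_cons_cons, PySem.Chars.join_singleton] at h2
  exact h h2.1

-- a head element with a nonempty prefix passes filter(None) unchanged
lemma pv_truthy_head (v : Option String) (pre : String) (h : pre ≠ "") :
    pvTruthy (if pvNotBlank v then some (PySem.Str.join "" [pre, v.getD ""]) else none)
    = if pvNotBlank v then some (PySem.Str.join "" [pre, v.getD ""]) else none := by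
  by_cases hk : pvNotBlank v = true
  · simp [hk, pvTruthy, pv_join_ne_empty pre _ h]
  · simp [hk, pvTruthy]

-- A's filter-then-map tail, after filter(None), is the filterMap of pvPiece (empty prefix)
lemma pv_tail_eq (g : String → Option String) (keys : List String) :
    ((keys.filter (fun k => pvNotBlank (g k))).map (fun k => some ((g k).getD ""))).filterMap pvTruthy
    = keys.filterMap (fun k => pvPiece g (k, "")) := by
  induction keys with
  | nil => simp
  | cons k rest ih =>
    rw [List.filter_cons]
    by_cases h : pvNotBlank (g k) = true
    · have hne : ((g k).getD "" == "") = false := by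
        cases hv : g k with
        | none => simp [pvNotBlank, hv] at h
        | some s =>
          simp only [Option.getD_some, beq_eq_false_iff_ne, ne_eq]
          intro hs
          simp [pvNotBlank, hv, hs] at h
      rw [if_pos h, List.map_cons, List.filterMap_cons, List.filterMap_cons, ih]
      simp [pvTruthy, hne, pvPiece, h, pv_join_empty_left]
    · rw [if_neg h, List.filterMap_cons, ih]
      simp [pvPiece, h]

-- assembling A's pieces, for an arbitrary lookup function g
lemma pv_assemble (g : String → Option String) :
    PySem.Str.join ", "
      (([ if pvNotBlank (g "room_no") then some (PySem.Str.join "" ["Room ", (g "room_no").getD ""]) else none,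
          if pvNotBlank (g "floor") then some (PySem.Str.join "" ["Floor ", (g "floor").getD ""]) else none,
          if pvNotBlank (g "unit") then some (PySem.Str.join "" ["Unit ", (g "unit").getD ""]) else none,
          if pvNotBlank (g "building_no") then some (PySem.Str.join "" ["Building No", (g "building_no").getD ""]) else none ]
        ++ (((["housing_name", "street_name", "block", "ward_name",
               "township_name", "city_name", "state_name",
               "country_name", "billing_township_name"] : List String).filter
                (fun k => pvNotBlank (g k))).map (fun k => some ((g k).getD "")))).filterMap pvTruthy)
    = PySem.Str.join ", " (pvSpecs.filterMap (pvPiece g)) := by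
  rw [show pvSpecs
        = [("room_no", "Room "), ("floor", "Floor "), ("unit", "Unit "),
           ("building_no", "Building No")]
          ++ (["housing_name", "street_name", "block", "ward_name",
               "township_name", "city_name", "state_name",
               "country_name", "billing_township_name"] : List String).map
                (fun k => (k, "")) from rfl,
      List.filterMap_append, List.filterMap_append, pv_tail_eq g]
  congr 2
  all_goals simp only [List.filterMap_cons, List.filterMap_nil,
      pv_truthy_head _ "Room " (by decide), pv_truthy_head _ "Floor " (by decide),
      pv_truthy_head _ "Unit " (by decide), pv_truthy_head _ "Building No" (by decide),
      pvPiece]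

-- A's result, in closed form: the filterMap of pvPiece over the spec table
lemma pv_A_eq (data : List (String × Option String)) :
    get_full_address data
    = PySem.Str.join ", "
        (pvSpecs.filterMap (pvPiece (fun k => (PySem.Dict.get? (PySem.Dict.mk data) k).getD none))) := by
  unfold get_full_address
  exact pv_assemble (fun k => (PySem.Dict.get? (PySem.Dict.mk data) k).getD none)

-- key facts about the concrete position table
lemma pv_pos_eval (i : Fin 13) :
    PySem.Dict.get? pvPos (pvSpecs.get ⟨i.1, i.2⟩).1
    = some (i.1, (pvSpecs.get ⟨i.1, i.2⟩).2) := by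
  revert i; decide

set_option maxHeartbeats 1000000 in
lemma pv_pos_sound (k : String) (ip : Nat × String)
    (h : PySem.Dict.get? pvPos k = some ip) :
    ∃ hlt : ip.1 < 13, (pvSpecs.get ⟨ip.1, hlt⟩) = (k, ip.2) := by
  have hpos : pvPos = PySem.Dict.mk
      [("room_no", (0, "Room ")), ("floor", (1, "Floor ")), ("unit", (2, "Unit ")),
       ("building_no", (3, "Building No")),
       ("housing_name", (4, "")), ("street_name", (5, "")), ("block", (6, "")),
       ("ward_name", (7, "")), ("township_name", (8, "")), ("city_name", (9, "")),
       ("state_name", (10, "")), ("country_name", (11, "")),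
       ("billing_township_name", (12, ""))] := by decide
  rw [hpos] at h
  simp only [PySem.Dict.get?_mk_cons, beq_iff_eq] at h
  by_cases e0 : ("room_no" : String) = k
  · rw [if_pos e0] at h
    injection h with h'
    subst h'
    subst e0
    exact ⟨by decide, by decide⟩
  rw [if_neg e0] at h
  by_cases e1 : ("floor" : String) = k
  · rw [if_pos e1] at h
    injection h with h'
    subst h'
    subst e1
    exact ⟨by decide, by decide⟩
  rw [if_neg e1] at h
  by_cases e2 : ("unit" : String) = k
  · rw [if_pos e2] at h
    injection h with h'
    subst h'
    subst e2
    exact ⟨by decide, by decide⟩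
  rw [if_neg e2] at h
  by_cases e3 : ("building_no" : String) = k
  · rw [if_pos e3] at h
    injection h with h'
    subst h'
    subst e3
    exact ⟨by decide, by decide⟩
  rw [if_neg e3] at h
  by_cases e4 : ("housing_name" : String) = k
  · rw [if_pos e4] at h
    injection h with h'
    subst h'
    subst e4
    exact ⟨by decide, by decide⟩
  rw [if_neg e4] at h
  by_cases e5 : ("street_name" : String) = k
  · rw [if_pos e5] at h
    injection h with h'
    subst h'
    subst e5
    exact ⟨by decide, by decide⟩
  rw [if_neg e5] at h
  by_cases e6 : ("block" : String) = k
  · rw [if_pos e6] at h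
    injection h with h'
    subst h'
    subst e6
    exact ⟨by decide, by decide⟩
  rw [if_neg e6] at h
  by_cases e7 : ("ward_name" : String) = k
  · rw [if_pos e7] at h
    injection h with h'
    subst h'
    subst e7
    exact ⟨by decide, by decide⟩
  rw [if_neg e7] at h
  by_cases e8 : ("township_name" : String) = k
  · rw [if_pos e8] at h
    injection h with h'
    subst h'
    subst e8
    exact ⟨by decide, by decide⟩
  rw [if_neg e8] at h
  by_cases e9 : ("city_name" : String) = k
  · rw [if_pos e9] at h
    injection h with h'
    subst h'
    subst e9
    exact ⟨by decide, by decide⟩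
  rw [if_neg e9] at h
  by_cases e10 : ("state_name" : String) = k
  · rw [if_pos e10] at h
    injection h with h'
    subst h'
    subst e10
    exact ⟨by decide, by decide⟩
  rw [if_neg e10] at h
  by_cases e11 : ("country_name" : String) = k
  · rw [if_pos e11] at h
    injection h with h'
    subst h'
    subst e11
    exact ⟨by decide, by decide⟩
  rw [if_neg e11] at h
  by_cases e12 : ("billing_township_name" : String) = k
  · rw [if_pos e12] at h
    injection h with h'
    subst h'
    subst e12
    exact ⟨by decide, by decide⟩
  rw [if_neg e12] at h
  simp [PySem.Dict.get?] at h

-- spec keys are pairwise distinct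
lemma pv_keys_inj (i j : Fin 13)
    (h : (pvSpecs.get ⟨i.1, i.2⟩).1 = (pvSpecs.get ⟨j.1, j.2⟩).1) : i = j := by
  revert h; revert i j; decide

lemma pv_upd_length (slots : List (Option String)) (kv : String × Option String) :
    (pvUpd slots kv).length = slots.length := by
  unfold pvUpd
  cases PySem.Dict.get? pvPos kv.1 with
  | none => rfl
  | some ip =>
    show (if pvNotBlank kv.2 = true
          then slots.set ip.1 (some (PySem.Str.join "" [ip.2, kv.2.getD ""]))
          else slots).length = slots.length
    by_cases h : pvNotBlank kv.2 = true
    · rw [if_pos h, List.length_set]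
    · rw [if_neg h]

lemma pv_fold_length (its : List (String × Option String)) (slots : List (Option String)) :
    (its.foldl pvUpd slots).length = slots.length := by
  induction its generalizing slots with
  | nil => rfl
  | cons kv rest ih => rw [List.foldl_cons, ih, pv_upd_length]

-- lookup of a key absent from the key column is none
lemma pv_lookup_not_mem (k : String) (l : List (String × Option String))
    (h : k ∉ l.map Prod.fst) : l.lookup k = none := by
  induction l with
  | nil => rfl
  | cons p t ih =>
    obtain ⟨k0, v0⟩ := p
    rw [List.lookup_cons]
    have hne : (k == k0) = false := by
      refine beq_eq_false_iff_ne.mpr (fun he => h ?_)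
      simp [he]
    rw [hne]
    exact ih (fun hm => h (by simp at hm ⊢; exact Or.inr hm))

-- the value B's loop leaves in slot i
lemma pv_fold_slot (i : Fin 13) (its : List (String × Option String))
    (slots : List (Option String)) (hlen : slots.length = 13)
    (hnd : (its.map Prod.fst).Nodup) :
    (its.foldl pvUpd slots)[i.1]? =
      match its.lookup (pvSpecs.get ⟨i.1, i.2⟩).1 with
      | some v =>
          if pvNotBlank v
          then some (some (PySem.Str.join "" [(pvSpecs.get ⟨i.1, i.2⟩).2, v.getD ""]))
          else slots[i.1]?
      | none => slots[i.1]? := by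
  induction its generalizing slots with
  | nil => simp [List.lookup]
  | cons kv rest ih =>
    obtain ⟨k0, v0⟩ := kv
    have hnd' : (k0 :: rest.map Prod.fst).Nodup := by simpa using hnd
    have hknr : k0 ∉ rest.map Prod.fst := (List.nodup_cons.mp hnd').1
    have hndr : (rest.map Prod.fst).Nodup := (List.nodup_cons.mp hnd').2
    rw [List.foldl_cons, List.lookup_cons]
    cases hpos : PySem.Dict.get? pvPos k0 with
    | none =>
      have hupd : pvUpd slots (k0, v0) = slots := by simp [pvUpd, hpos]
      have hne : ((pvSpecs.get ⟨i.1, i.2⟩).1 == k0) = false := by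
        refine beq_eq_false_iff_ne.mpr (fun he => ?_)
        rw [← he, pv_pos_eval i] at hpos
        simp at hpos
      rw [hupd, hne]
      exact ih slots hlen hndr
    | some ip =>
      obtain ⟨hlt, hspec⟩ := pv_pos_sound k0 ip hpos
      by_cases hb : pvNotBlank v0 = true
      · have hupd : pvUpd slots (k0, v0)
            = slots.set ip.1 (some (PySem.Str.join "" [ip.2, v0.getD ""])) := by
          simp [pvUpd, hpos, hb]
        rw [hupd]
        by_cases hk : (pvSpecs.get ⟨i.1, i.2⟩).1 = k0
        · -- this item fills exactly slot i; the rest of the loop leaves it alone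
          have hieq : ip.1 = i.1 := by
            have := pv_keys_inj ⟨ip.1, hlt⟩ i (by rw [hspec]; exact hk.symm)
            exact congrArg Fin.val this
          have hbq : ((pvSpecs.get ⟨i.1, i.2⟩).1 == k0) = true := beq_iff_eq.mpr hk
          have hlook : rest.lookup (pvSpecs.get ⟨i.1, i.2⟩).1 = none := by
            rw [hk]; exact pv_lookup_not_mem k0 rest hknr
          rw [hbq]
          rw [ih _ (by rw [List.length_set]; exact hlen) hndr, hlook]
          simp only [hb, if_true]
          have hgoal : (slots.set ip.1 (some (PySem.Str.join "" [ip.2, v0.getD ""])))[i.1]?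
              = some (some (PySem.Str.join "" [ip.2, v0.getD ""])) := by
            rw [hieq]
            exact List.getElem?_set_self (by omega)
          rw [hgoal]
          have heq : pvSpecs.get ⟨ip.1, hlt⟩ = pvSpecs.get ⟨i.1, i.2⟩ := by
            congr 1
            exact Fin.ext hieq
          rw [heq] at hspec
          rw [show ip.2 = (pvSpecs.get ⟨i.1, i.2⟩).2 from (congrArg Prod.snd hspec).symm]
        · -- this item fills a different slot
          have hne' : ip.1 ≠ i.1 := by
            intro he
            have heq : pvSpecs.get ⟨ip.1, hlt⟩ = pvSpecs.get ⟨i.1, i.2⟩ := by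
              congr 1
              exact Fin.ext he
            exact hk (((congrArg Prod.fst heq).symm).trans (congrArg Prod.fst hspec))
          have hbq : ((pvSpecs.get ⟨i.1, i.2⟩).1 == k0) = false := beq_eq_false_iff_ne.mpr hk
          rw [hbq]
          rw [ih _ (by rw [List.length_set]; exact hlen) hndr]
          have hset : (slots.set ip.1 (some (PySem.Str.join "" [ip.2, v0.getD ""])))[i.1]?
              = slots[i.1]? := List.getElem?_set_ne hne'
          cases rest.lookup (pvSpecs.get ⟨i.1, i.2⟩).1 with
          | none => simp [hset]
          | some v => by_cases hv : pvNotBlank v = true <;> simp [hv, hset]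
      · have hupd : pvUpd slots (k0, v0) = slots := by simp [pvUpd, hpos, hb]
        rw [hupd]
        by_cases hk : (pvSpecs.get ⟨i.1, i.2⟩).1 = k0
        · have hbq : ((pvSpecs.get ⟨i.1, i.2⟩).1 == k0) = true := beq_iff_eq.mpr hk
          have hlook : rest.lookup (pvSpecs.get ⟨i.1, i.2⟩).1 = none := by
            rw [hk]; exact pv_lookup_not_mem k0 rest hknr
          rw [hbq]
          rw [ih slots hlen hndr, hlook]
          simp [hb]
        · have hbq : ((pvSpecs.get ⟨i.1, i.2⟩).1 == k0) = false := beq_eq_false_iff_ne.mpr hk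
          rw [hbq]
          exact ih slots hlen hndr

-- List.lookup is Dict.get? on the items, up to the symmetric BEq test
lemma pv_lookup_eq_get? (l : List (String × Option String)) (k : String) :
    l.lookup k = (PySem.Dict.mk l).get? k := by
  induction l with
  | nil => rfl
  | cons p t ih =>
    obtain ⟨k0, v0⟩ := p
    rw [List.lookup_cons, PySem.Dict.get?_mk_cons]
    by_cases h : k = k0
    · have h1 : (k == k0) = true := beq_iff_eq.mpr h
      have h2 : (k0 == k) = true := beq_iff_eq.mpr h.symm
      rw [h1, h2]
      rfl
    · have h1 : (k == k0) = false := beq_eq_false_iff_ne.mpr h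
      have h2 : (k0 == k) = false := beq_eq_false_iff_ne.mpr (Ne.symm h)
      rw [h1, h2, ih]
      rfl

-- B's result, in the same closed form
lemma pv_B_eq (data : List (String × Option String))
    (hnd : (data.map Prod.fst).Nodup) :
    get_full_address_alt data
    = PySem.Str.join ", "
        (pvSpecs.filterMap (pvPiece (fun k => (PySem.Dict.get? (PySem.Dict.mk data) k).getD none))) := by
  set g : String → Option String :=
    fun k => (PySem.Dict.get? (PySem.Dict.mk data) k).getD none with hg
  have hslots : (PySem.Dict.mk data).items.foldl pvUpd
      (List.replicate pvSpecs.length (none : Option String))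
      = pvSpecs.map (pvPiece g) := by
    rw [show (PySem.Dict.mk data).items = data from rfl]
    apply List.ext_getElem?
    intro n
    by_cases hn : n < 13
    · have h1 := pv_fold_slot ⟨n, hn⟩ data
        (List.replicate pvSpecs.length (none : Option String)) (by simp [pvSpecs]) hnd
      simp only [List.get_eq_getElem] at h1
      rw [h1]
      have hrep : (List.replicate pvSpecs.length (none : Option String))[n]? = some none := by
        rw [List.getElem?_replicate]
        have hn' : n < pvSpecs.length := hn
        simp [hn']
      have hmap : (pvSpecs.map (pvPiece g))[n]? = some (pvPiece g pvSpecs[n]) := by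
        rw [List.getElem?_map, List.getElem?_eq_getElem (hn : n < pvSpecs.length), Option.map_some]
      rw [hmap, pv_lookup_eq_get?]
      cases hget : (PySem.Dict.mk data).get? pvSpecs[n].1 with
      | none =>
        have hgk : g pvSpecs[n].1 = none := by rw [hg]; simp [hget]
        rw [hrep]
        simp [pvPiece, hgk, pvNotBlank]
      | some v =>
        have hgk : g pvSpecs[n].1 = v := by rw [hg]; simp [hget]
        by_cases hv : pvNotBlank v = true
        · simp only [hv, if_true, pvPiece, hgk]
          rfl
        · simp only [hv]
          rw [hrep]
          simp [pvPiece, hgk, hv]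
    · have h1 : ((data.foldl pvUpd
          (List.replicate pvSpecs.length (none : Option String))))[n]? = none := by
        apply List.getElem?_eq_none
        rw [pv_fold_length]
        simp only [List.length_replicate]
        have : pvSpecs.length = 13 := rfl
        omega
      have h2 : (pvSpecs.map (pvPiece g))[n]? = none := by
        apply List.getElem?_eq_none
        rw [List.length_map]
        have : pvSpecs.length = 13 := rfl
        omega
      rw [h1, h2]
  show PySem.Str.join ", "
      (((PySem.Dict.mk data).items.foldl pvUpd
          (List.replicate pvSpecs.length (none : Option String))).filterMap id)
    = _
  rw [hslots, List.filterMap_map]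
  rfl

-- ===== VERDICT (by name: the statement is the Claim_ definition above) =====
theorem get_full_address_spec : Claim_equal_get_full_address := by
  intro data _ hpre
  unfold Spec_get_full_address
  rw [pv_A_eq, pv_B_eq data hpre]
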